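-- pv_equiv track=rewrite | github.com/ejwessel/AdventOfCode2019 | Day_8/DecodeSpaceImage.py | decodeImages
-- ===== SOURCE A (Python) =====
-- def decodeImages(image_layers):
--     final_image = []
--     row_size = len(image_layers[0])
--     col_size = len(image_layers[0][0])
--     for row in range(row_size):
--         for col in range(col_size):
--             # best pixel initially is transparent
--             best_pixel = '2'
--             for layer in image_layers:
--                 if int(best_pixel) < int('2'):
--                     # if best_pixel has been set then we've found the top pixel
--                     break
--                 elif int(layer[row][col]) < int(best_pixel):
--                     best_pixel = layer[row][col]
--             # add the best pixel
--             final_image.append(best_pixel)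
--     return final_image
-- ===== SOURCE B (Python) =====
-- def decodeImages(image_layers):
--     row_size = len(image_layers[0])
--     col_size = len(image_layers[0][0])
--     canvas = ['2'] * (row_size * col_size)
--     for layer in image_layers:
--         new_canvas = []
--         for row in range(row_size):
--             for col in range(col_size):
--                 b = canvas[row * col_size + col]
--                 if b == '2':
--                     p = layer[row][col]
--                     if int(p) < 2:
--                         b = p
--                 new_canvas.append(b)
--         canvas = new_canvas
--     return canvas
-- ===== Notes on version B (the rewrite author's own statement) =====
-- stated objective: alternative
-- what changed: B inverts the loop nesting: instead of scanning all layers per pixel with a break, it paints a flat canvas of '2's layer-by-layer front-to-back, updating only positions still unresolved, so per-layer it does one row-major pass and never re-walks the layer list per pixel.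
import Mathlib
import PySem

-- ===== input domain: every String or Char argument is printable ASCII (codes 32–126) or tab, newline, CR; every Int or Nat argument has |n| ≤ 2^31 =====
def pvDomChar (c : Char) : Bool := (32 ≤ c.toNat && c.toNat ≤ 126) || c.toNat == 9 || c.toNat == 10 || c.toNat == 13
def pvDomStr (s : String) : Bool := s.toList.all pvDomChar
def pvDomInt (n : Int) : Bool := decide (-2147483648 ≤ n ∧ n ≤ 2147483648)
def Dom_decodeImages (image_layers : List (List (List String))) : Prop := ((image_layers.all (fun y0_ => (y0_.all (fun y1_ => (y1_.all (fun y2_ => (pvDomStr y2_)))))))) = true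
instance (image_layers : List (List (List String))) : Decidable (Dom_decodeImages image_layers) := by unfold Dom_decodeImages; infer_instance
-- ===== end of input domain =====

-- B inverts the loop nesting: it paints a flat canvas of '2's layer-by-layer front-to-back,
-- updating only still-unresolved positions, instead of A's per-pixel scan over all layers with a break.
-- Same asymptotic cost; objective: alternative decomposition.

-- ===== PORT A =====
-- inner `for layer in image_layers` loop with `break`; `none` = the ValueError/IndexError paths
-- (indices r, c are Nats from range(), so `l[r]?` is exact for Python's `l[r]`; int('2') is the constant 2)
def scanA (r c : Nat) : List (List (List String)) → String → Option String
  | [], best => some best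
  | layer :: rest, best =>
    match PySem.Int.ofStr? best with
    | none => none
    | some bv =>
      if bv < 2 then some best          -- break: best pixel already found
      else
        match layer[r]? with
        | none => none
        | some rowL =>
          match rowL[c]? with
          | none => none
          | some p =>
            match PySem.Int.ofStr? p with
            | none => none
            | some pv => if pv < bv then scanA r c rest p else scanA r c rest best

-- `for col in range(col_size)` loop, appending to final_image
def colsA (image_layers : List (List (List String))) (r : Nat) : List Nat → List String → Option (List String)
  | [], acc => some acc
  | c :: cs, acc =>
    match scanA r c image_layers "2" with
    | none => none
    | some b => colsA image_layers r cs (acc ++ [b])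

-- `for row in range(row_size)` loop
def rowsA (image_layers : List (List (List String))) (C : Nat) : List Nat → List String → Option (List String)
  | [], acc => some acc
  | r :: rs, acc =>
    match colsA image_layers r (List.range C) acc with
    | none => none
    | some acc' => rowsA image_layers C rs acc'

def decodeImages (image_layers : List (List (List String))) : List String :=
  match image_layers[0]? with
  | none => []                          -- IndexError on image_layers[0]: outside Pre_
  | some l0 =>
    match l0[0]? with
    | none => []                        -- IndexError on image_layers[0][0]: outside Pre_
    | some r0 => (rowsA image_layers r0.length (List.range l0.length) []).getD []

-- ===== PORT B =====
-- body of B's innermost position update: keep b unless it is still '2' and the pixel is opaque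
def paintPixel (layer : List (List String)) (r c : Nat) (b : String) : Option String :=
  if b == "2" then
    match layer[r]? with
    | none => none
    | some rowL =>
      match rowL[c]? with
      | none => none
      | some p =>
        match PySem.Int.ofStr? p with
        | none => none
        | some pv => if pv < 2 then some p else some b
  else some b

-- `for col in range(col_size)` of one layer pass, appending to new_canvas
def colsB (layer : List (List String)) (canvas : List String) (C r : Nat) : List Nat → List String → Option (List String)
  | [], acc => some acc
  | c :: cs, acc =>
    match canvas[r * C + c]? with
    | none => none                      -- unreachable in Python: canvas index always in range
    | some b =>
      match paintPixel layer r c b with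
      | none => none
      | some b' => colsB layer canvas C r cs (acc ++ [b'])

-- `for row in range(row_size)` of one layer pass
def rowsB (layer : List (List String)) (canvas : List String) (C : Nat) : List Nat → List String → Option (List String)
  | [], acc => some acc
  | r :: rs, acc =>
    match colsB layer canvas C r (List.range C) acc with
    | none => none
    | some acc' => rowsB layer canvas C rs acc'

-- `for layer in image_layers` outer loop, rebinding canvas
def layersB (R C : Nat) : List (List (List String)) → List String → Option (List String)
  | [], canvas => some canvas
  | layer :: rest, canvas =>
    match rowsB layer canvas C (List.range R) [] with
    | none => none
    | some canvas' => layersB R C rest canvas'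

def decodeImages_alt (image_layers : List (List (List String))) : List String :=
  match image_layers[0]? with
  | none => []
  | some l0 =>
    match l0[0]? with
    | none => []
    | some r0 =>
      (layersB l0.length r0.length image_layers (List.replicate (l0.length * r0.length) "2")).getD []

-- ===== PRECONDITION & SPEC =====
-- pixel accessor: the int value of image_layers[l][r][c], none where Python would raise
def pixVal (image_layers : List (List (List String))) (l r c : Nat) : Option Int :=
  match image_layers[l]? with
  | none => none
  | some L =>
    match L[r]? with
    | none => none
    | some rowL =>
      match rowL[c]? with
      | none => none
      | some p => PySem.Int.ofStr? p

-- Exactly the inputs on which A returns: the layer list and its first layer are nonempty, and at every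
-- position every pixel that is not shadowed by an earlier opaque (< 2) pixel exists and parses as an int.
def Pre_decodeImages (image_layers : List (List (List String))) : Prop :=
  0 < image_layers.length ∧ 0 < image_layers.headI.length ∧
  ∀ r < image_layers.headI.length, ∀ c < image_layers.headI.headI.length,
    ∀ l < image_layers.length,
      (∀ l' < l, ((pixVal image_layers l' r c).any (fun v => decide (2 ≤ v))) = true) →
      (pixVal image_layers l r c).isSome = true

instance (image_layers : List (List (List String))) : Decidable (Pre_decodeImages image_layers) := by
  unfold Pre_decodeImages; infer_instance

def pvWitness_decodeImages : List (List (List String)) :=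
  [[["2", "1"], ["0", "2"]], [["1", "2"], ["2", "0"]]]

def Spec_decodeImages (image_layers : List (List (List String))) (out : List String) : Prop := out = decodeImages_alt image_layers
instance (image_layers : List (List (List String))) (out : List String) : Decidable (Spec_decodeImages image_layers out) := by unfold Spec_decodeImages; infer_instance

-- ===== CLAIM (what is proved, stated in full; the proofs are below) =====
def Claim_equal_decodeImages : Prop := ∀ (image_layers : List (List (List String))), Dom_decodeImages image_layers → Pre_decodeImages image_layers → Spec_decodeImages image_layers (decodeImages image_layers)

-- ===== LEMMAS AND PROOFS =====

-- option-valued map over a list, the common denominator of both loop nests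
def oMapM {α β : Type} (f : α → Option β) : List α → Option (List β)
  | [] => some []
  | x :: xs =>
    match f x with
    | none => none
    | some y =>
      match oMapM f xs with
      | none => none
      | some ys => some (y :: ys)

-- row-major list of positions
def posL (R C : Nat) : List (Nat × Nat) :=
  (List.range R).flatMap (fun r => (List.range C).map (fun c => (r, c)))

-- a scan state is either the initial '2' or an already found opaque pixel
def okState (b : String) : Prop := b = "2" ∨ ∃ v, PySem.Int.ofStr? b = some v ∧ v < 2

-- one iteration of A's inner layer loop, as a state transformer
def scanStep (layer : List (List String)) (r c : Nat) (b : String) : Option String :=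
  match PySem.Int.ofStr? b with
  | none => none
  | some bv =>
    if bv < 2 then some b
    else
      match layer[r]? with
      | none => none
      | some rowL =>
        match rowL[c]? with
        | none => none
        | some p =>
          match PySem.Int.ofStr? p with
          | none => none
          | some pv => some (if pv < bv then p else b)

theorem oMapM_congr {α β : Type} {f g : α → Option β} {l : List α}
    (h : ∀ x ∈ l, f x = g x) : oMapM f l = oMapM g l := by
  induction l with
  | nil => rfl
  | cons x xs ih =>
    simp only [oMapM, h x (List.mem_cons_self), ih (fun y hy => h y (List.mem_cons_of_mem _ hy))]

theorem oMapM_append {α β : Type} (f : α → Option β) (l₁ l₂ : List α) :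
    oMapM f (l₁ ++ l₂) = (oMapM f l₁).bind (fun ys => (oMapM f l₂).map (ys ++ ·)) := by
  induction l₁ with
  | nil =>
    cases h : oMapM f l₂ <;> simp [oMapM, h]
  | cons x xs ih =>
    simp only [List.cons_append, oMapM, ih]
    cases f x <;> cases oMapM f xs <;> cases oMapM f l₂ <;> simp

theorem oMapM_map {α β γ : Type} (f : β → Option γ) (h : α → β) (l : List α) :
    oMapM f (l.map h) = oMapM (fun x => f (h x)) l := by
  induction l with
  | nil => rfl
  | cons x xs ih => simp only [List.map_cons, oMapM, ih]

theorem oMapM_some {α β : Type} (f : α → β) (l : List α) :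
    oMapM (fun x => some (f x)) l = some (l.map f) := by
  induction l with
  | nil => rfl
  | cons x xs ih => simp [oMapM, ih]

theorem oMapM_eq_some_map {α β : Type} {f : α → Option β} {g : α → β} {l : List α}
    (h : ∀ x ∈ l, f x = some (g x)) : oMapM f l = some (l.map g) := by
  rw [oMapM_congr h, oMapM_some]

theorem oMapM_none {α β : Type} {f : α → Option β} {l : List α} {x : α}
    (hx : x ∈ l) (h : f x = none) : oMapM f l = none := by
  induction l with
  | nil => cases hx
  | cons y ys ih =>
    rcases List.mem_cons.mp hx with rfl | hmem
    · simp [oMapM, h]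
    · simp only [oMapM, ih hmem]; cases f y <;> rfl

theorem mem_posL {R C : Nat} {p : Nat × Nat} :
    p ∈ posL R C ↔ p.1 < R ∧ p.2 < C := by
  cases p with
  | mk r c => simp [posL, List.mem_flatMap, List.mem_map, List.mem_range, eq_comm, and_comm]

theorem posL_length (R C : Nat) : (posL R C).length = R * C := by
  induction R with
  | zero => simp [posL]
  | succ n ih =>
    simp only [posL, List.range_succ, List.flatMap_append, List.length_append] at *
    simp [ih, Nat.succ_mul]

theorem getElem?_posL {R C r c : Nat} (hr : r < R) (hc : c < C) :
    (posL R C)[r * C + c]? = some (r, c) := by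
  induction R with
  | zero => omega
  | succ n ih =>
    have hsplit : posL (n + 1) C = posL n C ++ (List.range C).map (fun c => (n, c)) := by
      simp [posL, List.range_succ]
    by_cases hrn : r < n
    · rw [hsplit, List.getElem?_append_left (by rw [posL_length]; calc
        r * C + c < r * C + C := by omega
        _ = (r + 1) * C := by ring
        _ ≤ n * C := Nat.mul_le_mul_right _ (by omega))]
      exact ih hrn
    · have hr' : r = n := by omega
      subst hr'
      rw [hsplit, List.getElem?_append_right (by rw [posL_length]; exact Nat.le_add_right _ _)]
      rw [posL_length]
      simp [List.getElem?_map, List.getElem?_range hc]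

-- the scan absorbs an already found opaque pixel
theorem scanA_winner {r c : Nat} {b : String} {v : Int}
    (hb : PySem.Int.ofStr? b = some v) (hv : v < 2) :
    ∀ ls, scanA r c ls b = some b := by
  intro ls
  cases ls with
  | nil => rfl
  | cons layer rest => simp [scanA, hb, hv]

theorem scanA_cons {r c : Nat} {b : String} (layer : List (List String))
    (rest : List (List (List String))) (hok : okState b) :
    scanA r c (layer :: rest) b = (scanStep layer r c b).bind (scanA r c rest) := by
  simp only [scanA, scanStep]
  cases hb : PySem.Int.ofStr? b with
  | none => rfl
  | some bv =>
    by_cases hbv : bv < 2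
    · simp only [if_pos hbv, Option.bind_some]
      rcases hok with rfl | ⟨v, hv, hvlt⟩
      · have h2 : PySem.Int.ofStr? "2" = some 2 := by decide
        rw [h2] at hb
        injection hb with hb'
        omega
      · rw [hv] at hb
        injection hb with hb'
        subst hb'
        exact (scanA_winner hv hvlt rest).symm
    · simp only [if_neg hbv]
      cases layer[r]? with
      | none => rfl
      | some rowL =>
        dsimp only
        cases rowL[c]? with
        | none => rfl
        | some p =>
          dsimp only
          cases PySem.Int.ofStr? p with
          | none => rfl
          | some pv =>
            dsimp only
            by_cases hpv : pv < bv <;> simp [hpv]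

theorem paintPixel_eq_scanStep {b : String} (layer : List (List String)) (r c : Nat)
    (hok : okState b) : paintPixel layer r c b = scanStep layer r c b := by
  rcases hok with rfl | ⟨v, hv, hvlt⟩
  · have h2 : PySem.Int.ofStr? "2" = some 2 := by decide
    simp only [paintPixel, scanStep, h2]
    norm_num
    cases layer[r]? with
    | none => rfl
    | some rowL =>
      dsimp only
      cases rowL[c]? with
      | none => rfl
      | some p =>
        dsimp only
        cases PySem.Int.ofStr? p with
        | none => rfl
        | some pv =>
          dsimp only
          by_cases hpv : pv ≤ 1
          · rw [if_pos hpv, if_pos hpv]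
          · rw [if_neg hpv, if_neg hpv]
  · have hne : (b == "2") = false := by
      apply beq_eq_false_iff_ne.mpr
      intro h; subst h
      have : PySem.Int.ofStr? "2" = some 2 := by decide
      rw [this] at hv; cases hv; omega
    simp [paintPixel, scanStep, hne, hv, hvlt]

theorem scanStep_ok {b b' : String} {layer : List (List String)} {r c : Nat}
    (hok : okState b) (h : scanStep layer r c b = some b') : okState b' := by
  simp only [scanStep] at h
  cases hb : PySem.Int.ofStr? b with
  | none => rw [hb] at h; cases h
  | some bv =>
    rw [hb] at h
    dsimp only at h
    by_cases hbv : bv < 2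
    · rw [if_pos hbv] at h
      cases h
      exact hok
    · rw [if_neg hbv] at h
      have hb2 : b = "2" ∧ bv = 2 := by
        rcases hok with rfl | ⟨v, hv, hvlt⟩
        · have h2 : PySem.Int.ofStr? "2" = some 2 := by decide
          rw [h2] at hb; cases hb; exact ⟨rfl, rfl⟩
        · rw [hv] at hb; cases hb; omega
      cases hL : layer[r]? with
      | none => rw [hL] at h; cases h
      | some rowL =>
        rw [hL] at h; dsimp only at h
        cases hC : rowL[c]? with
        | none => rw [hC] at h; cases h
        | some p =>
          rw [hC] at h; dsimp only at h
          cases hp : PySem.Int.ofStr? p with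
          | none => rw [hp] at h; cases h
          | some pv =>
            rw [hp] at h
            dsimp only at h
            injection h with h
            subst h
            by_cases hpv : pv < bv
            · rw [if_pos hpv]
              exact Or.inr ⟨pv, hp, by omega⟩
            · rw [if_neg hpv]; exact hok

-- A's column loop is an oMapM over the column indices
theorem colsA_eq (image_layers : List (List (List String))) (r : Nat) :
    ∀ (cs : List Nat) (acc : List String),
      colsA image_layers r cs acc
        = (oMapM (fun c => scanA r c image_layers "2") cs).map (acc ++ ·) := by
  intro cs
  induction cs with
  | nil => intro acc; simp [colsA, oMapM]
  | cons c cs ih =>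
    intro acc
    simp only [colsA, oMapM]
    cases scanA r c image_layers "2" with
    | none => rfl
    | some b =>
      dsimp only
      rw [ih (acc ++ [b])]
      cases oMapM (fun c => scanA r c image_layers "2") cs <;> simp

-- A's row loop is an oMapM over the row-major position list
theorem rowsA_eq (image_layers : List (List (List String))) (C : Nat) :
    ∀ (rs : List Nat) (acc : List String),
      rowsA image_layers C rs acc
        = (oMapM (fun p => scanA p.1 p.2 image_layers "2")
            (rs.flatMap (fun r => (List.range C).map (fun c => (r, c))))).map (acc ++ ·) := by
  intro rs
  induction rs with
  | nil => intro acc; simp [rowsA, oMapM]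
  | cons r rs ih =>
    intro acc
    simp only [rowsA, List.flatMap_cons, oMapM_append, oMapM_map]
    rw [colsA_eq]
    cases oMapM (fun c => scanA r c image_layers "2") (List.range C) with
    | none => rfl
    | some ys =>
      simp only [Option.map_some, Option.bind_some]
      rw [ih (acc ++ ys)]
      cases oMapM (fun p => scanA p.1 p.2 image_layers "2")
          (rs.flatMap (fun r => (List.range C).map (fun c => (r, c)))) <;> simp

-- B's column loop, same shape
theorem colsB_eq (layer : List (List String)) (canvas : List String) (C r : Nat) :
    ∀ (cs : List Nat) (acc : List String),
      colsB layer canvas C r cs acc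
        = (oMapM (fun c => (canvas[r * C + c]?).bind (paintPixel layer r c)) cs).map (acc ++ ·) := by
  intro cs
  induction cs with
  | nil => intro acc; simp [colsB, oMapM]
  | cons c cs ih =>
    intro acc
    simp only [colsB, oMapM]
    cases canvas[r * C + c]? with
    | none => rfl
    | some b =>
      simp only [Option.bind_some]
      cases paintPixel layer r c b with
      | none => rfl
      | some b' =>
        dsimp only
        rw [ih (acc ++ [b'])]
        cases oMapM (fun c => (canvas[r * C + c]?).bind (paintPixel layer r c)) cs <;> simp

-- B's row loop over the position list
theorem rowsB_eq (layer : List (List String)) (canvas : List String) (C : Nat) :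
    ∀ (rs : List Nat) (acc : List String),
      rowsB layer canvas C rs acc
        = (oMapM (fun p => (canvas[p.1 * C + p.2]?).bind (paintPixel layer p.1 p.2))
            (rs.flatMap (fun r => (List.range C).map (fun c => (r, c))))).map (acc ++ ·) := by
  intro rs
  induction rs with
  | nil => intro acc; simp [rowsB, oMapM]
  | cons r rs ih =>
    intro acc
    simp only [rowsB, List.flatMap_cons, oMapM_append, oMapM_map]
    rw [colsB_eq]
    cases oMapM (fun c => (canvas[r * C + c]?).bind (paintPixel layer r c)) (List.range C) with
    | none => rfl
    | some ys =>
      simp only [Option.map_some, Option.bind_some]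
      rw [ih (acc ++ ys)]
      cases oMapM (fun p => (canvas[p.1 * C + p.2]?).bind (paintPixel layer p.1 p.2))
          (rs.flatMap (fun r => (List.range C).map (fun c => (r, c)))) <;> simp

-- MAIN INVARIANT: painting the remaining layers onto a canvas of per-position scan states
-- computes exactly the per-position scans of those layers
theorem layersB_eq (R C : Nat) :
    ∀ (lss : List (List (List String))) (f : Nat × Nat → String),
      (∀ p ∈ posL R C, okState (f p)) →
      layersB R C lss ((posL R C).map f)
        = oMapM (fun p => scanA p.1 p.2 lss (f p)) (posL R C) := by
  intro lss
  induction lss with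
  | nil =>
    intro f _
    simp only [layersB]
    exact (oMapM_some f (posL R C)).symm
  | cons layer rest ih =>
    intro f hok
    have hcanvas : ∀ p ∈ posL R C,
        (((posL R C).map f)[p.1 * C + p.2]?).bind (paintPixel layer p.1 p.2)
          = scanStep layer p.1 p.2 (f p) := by
      intro p hp
      obtain ⟨hr, hc⟩ := mem_posL.mp hp
      rw [List.getElem?_map, getElem?_posL hr hc]
      simp only [Option.map_some, Option.bind_some]
      exact paintPixel_eq_scanStep layer p.1 p.2 (hok p hp)
    have hrows : rowsB layer ((posL R C).map f) C (List.range R) []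
        = (oMapM (fun p => scanStep layer p.1 p.2 (f p)) (posL R C)).map (fun x => [] ++ x) := by
      rw [rowsB_eq]
      exact congrArg _ (oMapM_congr hcanvas)
    simp only [layersB]
    by_cases hall : ∀ p ∈ posL R C, (scanStep layer p.1 p.2 (f p)).isSome = true
    · set f' : Nat × Nat → String := fun p => (scanStep layer p.1 p.2 (f p)).getD "2" with hf'
      have hstep : ∀ p ∈ posL R C, scanStep layer p.1 p.2 (f p) = some (f' p) := by
        intro p hp
        have hs := hall p hp
        cases ho : scanStep layer p.1 p.2 (f p) with
        | none => rw [ho] at hs; cases hs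
        | some b => simp [hf', ho]
      have hsome : oMapM (fun p => scanStep layer p.1 p.2 (f p)) (posL R C)
          = some ((posL R C).map f') := oMapM_eq_some_map hstep
      rw [hrows, hsome]
      simp only [Option.map_some, List.nil_append]
      rw [ih f' (fun p hp => scanStep_ok (hok p hp) (hstep p hp))]
      apply oMapM_congr
      intro p hp
      rw [scanA_cons _ _ (hok p hp), hstep p hp, Option.bind_some]
    · push Not at hall
      obtain ⟨p, hp, hnone⟩ := hall
      have hnone' : scanStep layer p.1 p.2 (f p) = none := by
        cases h : scanStep layer p.1 p.2 (f p) with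
        | none => rfl
        | some b => rw [h] at hnone; simp at hnone
      rw [hrows, oMapM_none hp hnone']
      rw [oMapM_none hp (by rw [scanA_cons _ _ (hok p hp), hnone']; rfl)]
      rfl

-- the two ports agree on EVERY input (even where Python raises both return [])
theorem ports_eq (image_layers : List (List (List String))) :
    decodeImages image_layers = decodeImages_alt image_layers := by
  simp only [decodeImages, decodeImages_alt]
  cases h0 : image_layers[0]? with
  | none => rfl
  | some l0 =>
    dsimp only
    cases h1 : l0[0]? with
    | none => rfl
    | some r0 =>
      dsimp only
      have hrep : List.replicate (l0.length * r0.length) "2"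
          = (posL l0.length r0.length).map (fun _ => "2") := by
        rw [List.map_const', posL_length]
      rw [hrep, layersB_eq l0.length r0.length image_layers (fun _ => "2")
        (fun p _ => Or.inl rfl)]
      rw [rowsA_eq]
      have hfold : (List.range l0.length).flatMap
          (fun r => (List.range r0.length).map (fun c => (r, c))) = posL l0.length r0.length := rfl
      rw [hfold]
      cases oMapM (fun p => scanA p.1 p.2 image_layers "2") (posL l0.length r0.length) <;> simp

-- ===== VERDICT (by name: the statement is the Claim_ definition above) =====
theorem decodeImages_spec : Claim_equal_decodeImages := by
  intro image_layers _ _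
  show decodeImages image_layers = decodeImages_alt image_layers
  exact ports_eq image_layers
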